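-- pv_equiv track=rewrite | github.com/Leony99/Smaller-Projects | .Py/4. Cartesiuscapital  - problemas/2.py | encontrar_a_menor_A
-- ===== SOURCE A (Python) =====
-- def encontrar_a_menor_A(N, digitos):
--     #Função para verificar se uma sequência pode ser gerada a partir de A
--     def pode_gerar_sequencia(current_A):
--         i = 0
--         while i < len(digitos):
--             if not digitos.startswith(current_A, i):
--                 return False
--             i += len(current_A)
--             current_A = str(int(current_A) + 1)
--         return True
--
--     #Tentar formar o menor A possível
--     for length in range(1, len(digitos) + 1):
--         current_A = digitos[:length]
--         if pode_gerar_sequencia(current_A):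
--             return current_A
--
--     return None
-- ===== SOURCE B (Python) =====
-- def encontrar_a_menor_A(N, digitos):
--     n = len(digitos)
--     for length in range(1, n + 1):
--         prefix = digitos[:length]
--         k = int(prefix)
--         # Stage 1: arithmetically find the last number m whose decimal lengths
--         # tile the string exactly (no string comparisons yet).
--         total = length
--         m = k
--         while total < n:
--             m += 1
--             total += len(str(m))
--         if total != n:
--             continue
--         # Stage 2: verify chunks right-to-left at the precomputed boundaries.
--         i = n
--         ok = True
--         for j in range(m, k, -1):
--             s = str(j)
--             i -= len(s)
--             if digitos[i:i + len(s)] != s: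
--                 ok = False
--                 break
--         if ok:
--             return prefix
--     return None
-- ===== Notes on version B (the rewrite author's own statement) =====
-- stated objective: alternative
-- what changed: A verifies each candidate prefix by walking the string left-to-right with startswith and rebuilding each successive number; B never walks with startswith: it first determines the last number m purely arithmetically (summing decimal lengths until they tile len(digitos), rejecting on overshoot with no string comparison at all), then checks the chunks right-to-left at the precomputed boundaries, counting m down to the start value.
-- outside the precondition, e.g. on encontrar_a_menor_A(0, '1_'): A raises ValueError, B raises ValueError; on encontrar_a_menor_A(0, 'a'): A raises ValueError, B raises ValueError; on encontrar_a_menor_A(0, '9 10'): A returns '9 ', B returns '9 '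
import Mathlib
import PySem

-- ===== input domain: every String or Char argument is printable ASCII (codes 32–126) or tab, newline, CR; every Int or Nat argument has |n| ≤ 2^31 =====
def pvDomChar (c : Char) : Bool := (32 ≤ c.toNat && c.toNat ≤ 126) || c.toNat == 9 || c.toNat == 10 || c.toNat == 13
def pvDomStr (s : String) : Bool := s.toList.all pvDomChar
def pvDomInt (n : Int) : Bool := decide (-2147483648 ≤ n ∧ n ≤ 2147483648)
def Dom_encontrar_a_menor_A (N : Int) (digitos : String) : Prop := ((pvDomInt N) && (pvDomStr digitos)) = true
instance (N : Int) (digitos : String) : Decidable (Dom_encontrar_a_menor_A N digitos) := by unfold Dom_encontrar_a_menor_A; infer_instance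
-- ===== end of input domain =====

-- A verifies each candidate prefix by a left-to-right startswith walk that rebuilds each successive
-- number; B instead first computes the last number m purely arithmetically (summing decimal lengths
-- until they tile len(digitos), rejecting on overshoot with no string comparison), then checks the
-- chunks right-to-left at the precomputed boundaries.  Objective: alternative.

-- ===== PORT A =====
-- int(current_A): the port memoizes the int value once computed — 'memo = some k' holds exactly when
-- current_A = str(k), where Python's int(str(k)) is k (exact); the first chunk is parsed with ofChars?.
def pvParse (cur : List Char) (memo : Option Int) : Option Int :=
  match memo with
  | some k => some k
  | none => PySem.Int.ofChars? cur

-- while i < len(digitos): … — fuel len+2 is enough (each round advances i by len(current_A) ≥ 1);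
-- 'none' = the ValueError of int() (excluded by Pre_).  digitos.startswith(cur, i) with 0 ≤ i < len
-- is exactly startswith on the drop.
def pvPodeGerar (ds : List Char) : Nat → Nat → List Char → Option Int → Option Bool
  | 0, _, _, _ => none
  | fuel+1, i, cur, memo =>
    if i < ds.length then
      if PySem.Chars.startswith (ds.drop i) cur then
        match pvParse cur memo with
        | none => none
        | some v => pvPodeGerar ds fuel (i + cur.length) (PySem.Int.toChars (v+1)) (some (v+1))
      else some false
    else some true

-- for length in range(1, len(digitos)+1): …
def pvTenta (ds : List Char) : List Nat → Option String
  | [] => none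
  | L :: rest =>
    let cur := ds.take L
    match pvPodeGerar ds (ds.length + 2) 0 cur none with
    | some true => some (String.ofList cur)
    | some false => pvTenta ds rest
    | none => none

def encontrar_a_menor_A (N : Int) (digitos : String) : Option String :=
  pvTenta digitos.toList (List.range' 1 digitos.toList.length)

-- ===== PORT B =====
-- while total < n: m += 1; total += len(str(m)) — fuel n+1 is enough (total grows by ≥ 1 per round,
-- so the loop runs fewer than n times); 'none' (fuel exhausted) is unreachable.
def pvGrow (n : Nat) : Nat → Int → Nat → Option (Int × Nat)
  | 0, _, _ => none
  | fuel+1, m, total =>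
    if total < n then pvGrow n fuel (m+1) (total + (PySem.Int.toChars (m+1)).length)
    else some (m, total)

-- for j in range(m, k, -1): s = str(j); i -= len(s); if digitos[i:i+len(s)] != s: break — the
-- iteration count is (m-k).toNat; i stays a Python int and the slice is PySem.List.slice (exact).
def pvBack (ds : List Char) : Nat → Int → Int → Bool
  | 0, _, _ => true
  | c+1, j, i =>
    let s := PySem.Int.toChars j
    let i' := i - s.length
    if PySem.List.slice ds (some i') (some (i' + s.length)) = s then pvBack ds c (j-1) i'
    else false

def pvBAlt (ds : List Char) : List Nat → Option String
  | [] => none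
  | L :: rest =>
    let pref := ds.take L
    match PySem.Int.ofChars? pref with
    | none => none   -- int(prefix) raises ValueError: excluded by Pre_
    | some k =>
      match pvGrow ds.length (ds.length + 1) k L with
      | none => none
      | some (m, total) =>
        if total = ds.length then
          if pvBack ds (m - k).toNat m ds.length then some (String.ofList pref)
          else pvBAlt ds rest
        else pvBAlt ds rest

def encontrar_a_menor_A_alt (N : Int) (digitos : String) : Option String :=
  pvBAlt digitos.toList (List.range' 1 digitos.toList.length)

-- ===== PRECONDITION & SPEC =====
-- Pre_ excludes the inputs on which A raises ValueError (some prefix of digitos is not a Python int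
-- literal and no shorter prefix generates the whole string): it requires every prefix digitos[:L] to
-- parse as int.  This also excludes rare strings such as "9 10", where A happens to return "9 " before
-- ever parsing the malformed full prefix (B returns the same value there).
def Pre_encontrar_a_menor_A (N : Int) (digitos : String) : Prop :=
  ∀ L ∈ List.range' 1 digitos.toList.length, (PySem.Int.ofChars? (digitos.toList.take L)).isSome = true
instance (N : Int) (digitos : String) : Decidable (Pre_encontrar_a_menor_A N digitos) := by
  unfold Pre_encontrar_a_menor_A; infer_instance

def pvWitness_encontrar_a_menor_A : Int × String := (0, "12")

def Spec_encontrar_a_menor_A (N : Int) (digitos : String) (out : Option String) : Prop := out = encontrar_a_menor_A_alt N digitos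
instance (N : Int) (digitos : String) (out : Option String) : Decidable (Spec_encontrar_a_menor_A N digitos out) := by unfold Spec_encontrar_a_menor_A; infer_instance

-- ===== CLAIM (what is proved, stated in full; the proofs are below) =====
def Claim_equal_encontrar_a_menor_A : Prop := ∀ (N : Int) (digitos : String), Dom_encontrar_a_menor_A N digitos → Pre_encontrar_a_menor_A N digitos → Spec_encontrar_a_menor_A N digitos (encontrar_a_menor_A N digitos)

-- ===== LEMMAS AND PROOFS =====

-- str(k) is never the empty string
theorem pv_toDigitsCore_len (b : Nat) : ∀ (fuel n : Nat) (ds : List Char),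
    ds.length ≤ (Nat.toDigitsCore b fuel n ds).length := by
  intro fuel
  induction fuel with
  | zero => intro n ds; simp [Nat.toDigitsCore]
  | succ f ih =>
    intro n ds
    simp only [Nat.toDigitsCore]
    split
    · simp
    · exact le_trans (by simp) (ih (n / b) (Nat.digitChar (n % b) :: ds))

theorem pv_toChars_ne_nil (k : Int) : PySem.Int.toChars k ≠ [] := by
  unfold PySem.Int.toChars
  split
  · simp
  · show Nat.toDigits 10 k.toNat ≠ []
    unfold Nat.toDigits
    simp only [Nat.toDigitsCore]
    split
    · simp
    · intro hnil
      have h := pv_toDigitsCore_len 10 k.toNat (k.toNat / 10) (Nat.digitChar (k.toNat % 10) :: [])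
      rw [hnil] at h
      simp at h

theorem pv_toChars_len_pos (k : Int) : 1 ≤ (PySem.Int.toChars k).length := by
  cases h : PySem.Int.toChars k with
  | nil => exact absurd h (pv_toChars_ne_nil k)
  | cons a l => simp

-- the expected continuation after value k: str(k+1) ++ str(k+2) ++ … (c chunks)
def pvCat (k : Int) : Nat → List Char
  | 0 => []
  | c+1 => PySem.Int.toChars (k+1) ++ pvCat (k+1) c

theorem pvCat_succ_right (k : Int) (c : Nat) :
    pvCat k (c+1) = pvCat k c ++ PySem.Int.toChars (k + c + 1) := by
  induction c generalizing k with
  | zero => simp [pvCat]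
  | succ c ih =>
    show PySem.Int.toChars (k+1) ++ pvCat (k+1) (c+1) = pvCat k (c+1) ++ _
    rw [ih (k+1)]
    show _ = (PySem.Int.toChars (k+1) ++ pvCat (k+1) c) ++ _
    rw [List.append_assoc]
    congr 2
    push_cast
    ring_nf

theorem pvCat_len_lt (k : Int) (c c' : Nat) (h : c < c') : (pvCat k c).length < (pvCat k c').length := by
  induction c' with
  | zero => omega
  | succ c' ih =>
    rw [pvCat_succ_right]
    rcases Nat.lt_succ_iff_lt_or_eq.mp h with h' | h'
    · calc (pvCat k c).length < (pvCat k c').length := ih h'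
        _ ≤ _ := by simp
    · subst h'
      have := pv_toChars_len_pos (k + c + 1)
      simp
      omega

-- A's verifier from state (i, cur) with parsed value v accepts iff i is already past the end or the
-- rest of the string is exactly cur followed by the incrementing continuation.
theorem pv_Achar (ds : List Char) : ∀ (fuel i : Nat) (cur : List Char) (memo : Option Int) (v : Int),
    i ≤ ds.length → cur ≠ [] → ds.length - i < fuel → pvParse cur memo = some v →
    ∃ b, pvPodeGerar ds fuel i cur memo = some b ∧
      (b = true ↔ (ds.length ≤ i ∨ ∃ c, ds.drop i = cur ++ pvCat v c)) := by
  intro fuel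
  induction fuel with
  | zero => intro i cur memo v _ _ h _; omega
  | succ f ih =>
    intro i cur memo v hi hcur hfuel hparse
    have hlen : 1 ≤ cur.length := by
      cases cur with
      | nil => exact absurd rfl hcur
      | cons a l => simp
    by_cases hin : i < ds.length
    · by_cases hsw : PySem.Chars.startswith (ds.drop i) cur = true
      · -- matching chunk: step to the next number
        have hpfx : cur <+: ds.drop i := (PySem.Chars.startswith_iff _ _).mp hsw
        have hclen : cur.length ≤ ds.length - i := by
          have := hpfx.length_le; simp at this; omega
        have hdecomp : ds.drop i = cur ++ ds.drop (i + cur.length) := by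
          obtain ⟨r, hr⟩ := hpfx
          have : r = ds.drop (i + cur.length) := by
            have := congrArg (List.drop cur.length) hr
            simpa [List.drop_append, List.drop_drop, Nat.add_comm] using this
          rw [← hr, this]
        obtain ⟨b', hb', hiff⟩ := ih (i + cur.length) (PySem.Int.toChars (v+1)) (some (v+1)) (v+1)
          (by omega) (pv_toChars_ne_nil _) (by omega) rfl
        refine ⟨b', ?_, ?_⟩
        · simp only [pvPodeGerar]
          rw [if_pos hin, if_pos hsw, hparse]
          exact hb'
        · rw [hiff]
          constructor
          · rintro (h | ⟨c', hc'⟩)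
            · -- i + |cur| = len: the continuation is empty
              refine Or.inr ⟨0, ?_⟩
              have hnil : ds.drop (i + cur.length) = [] := List.drop_eq_nil_of_le h
              rw [hdecomp, hnil]; rfl
            · exact Or.inr ⟨c' + 1, by rw [hdecomp, hc']; rfl⟩
          · rintro (h | ⟨c, hc⟩)
            · omega
            · cases c with
              | zero =>
                left
                have hnil : ds.drop (i + cur.length) = [] := by
                  have := hdecomp.symm.trans hc
                  simpa [pvCat] using List.append_cancel_left this
                have := congrArg List.length hnil
                simp at this; omega
              | succ c' =>
                refine Or.inr ⟨c', ?_⟩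
                have := hdecomp.symm.trans hc
                have := List.append_cancel_left this
                simpa [pvCat] using this
      · -- mismatch: A answers false and no tiling exists
        refine ⟨false, ?_, ?_⟩
        · simp only [pvPodeGerar]
          rw [if_pos hin, if_neg hsw]
        · simp only [Bool.false_eq_true, false_iff]
          rintro (h | ⟨c, hc⟩)
          · omega
          · exact hsw ((PySem.Chars.startswith_iff _ _).mpr ⟨pvCat v c, hc.symm ▸ rfl⟩)
    · -- i = len(digitos): A accepts
      refine ⟨true, ?_, by simp; omega⟩
      simp only [pvPodeGerar]
      rw [if_neg (by omega)]

-- B's while loop: starting from c already-accounted chunks it stops at the least c0 with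
-- L + |pvCat k c0| ≥ n, returning (k + c0, that total).
theorem pv_grow (n L : Nat) (k : Int) : ∀ (fuel c : Nat), n - (L + (pvCat k c).length) < fuel →
    ∃ c0, c ≤ c0 ∧
      pvGrow n fuel (k + c) (L + (pvCat k c).length) = some (k + c0, L + (pvCat k c0).length) ∧
      n ≤ L + (pvCat k c0).length ∧ (∀ c'', c ≤ c'' → c'' < c0 → L + (pvCat k c'').length < n) := by
  intro fuel
  induction fuel with
  | zero => intro c h; omega
  | succ f ih =>
    intro c hfuel
    by_cases h : L + (pvCat k c).length < n
    · have hstep : (pvCat k (c+1)).length = (pvCat k c).length + (PySem.Int.toChars (k + c + 1)).length := by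
        rw [pvCat_succ_right]; simp
    
      obtain ⟨c0, hle, heq, hge, hmin⟩ := ih (c + 1)
        (by have := pv_toChars_len_pos (k + c + 1); omega)
      refine ⟨c0, by omega, ?_, hge, ?_⟩
      · simp only [pvGrow]
        rw [if_pos h]
        have harg : (k + (c:Int)) + 1 = k + ((c+1 : Nat) : Int) := by push_cast; ring
        have harg2 : L + (pvCat k c).length + (PySem.Int.toChars (k + (c:Int) + 1)).length
            = L + (pvCat k (c+1)).length := by rw [hstep]; ring
        rw [harg2, harg]
        exact heq
      · intro c'' hc1 hc2
        rcases Nat.eq_or_lt_of_le hc1 with h' | h'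
        · subst h'; exact h
        · exact hmin c'' h' hc2
    · exact ⟨c, le_refl _, by simp only [pvGrow]; rw [if_neg h], by omega, by omega⟩

-- a segment equals a ++ b iff its two halves equal a and b (at in-range boundaries)
theorem pv_seg_split {α : Type} (ds a b : List α) (i : Nat) (h : i + a.length + b.length ≤ ds.length) :
    ((ds.drop i).take (a.length + b.length) = a ++ b) ↔
    ((ds.drop i).take a.length = a ∧ (ds.drop (i + a.length)).take b.length = b) := by
  rw [List.take_add]
  have hdd : (ds.drop i).drop a.length = ds.drop (i + a.length) := by
    rw [List.drop_drop]
  rw [hdd]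
  constructor
  · intro hab
    exact List.append_inj hab (by simp; omega)
  · rintro ⟨h1, h2⟩; rw [h1, h2]

-- B's backward scan from position e over c chunks ending at number k+c accepts iff the segment
-- [e - |pvCat k c|, e) of ds is exactly pvCat k c.
theorem pv_back (ds : List Char) : ∀ (c : Nat) (k : Int) (e : Nat),
    (pvCat k c).length ≤ e → e ≤ ds.length →
    (pvBack ds c (k + c) (e : Int) = true ↔
      (ds.drop (e - (pvCat k c).length)).take (pvCat k c).length = pvCat k c) := by
  intro c
  induction c with
  | zero => intro k e _ _; simp [pvBack, pvCat]
  | succ c ih =>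
    intro k e hle hn
    have hsucc : (pvCat k (c+1)).length = (pvCat k c).length + (PySem.Int.toChars (k + c + 1)).length := by
      rw [pvCat_succ_right]; simp
    set s := PySem.Int.toChars (k + c + 1) with hs
    have hi' : (e : Int) - (s.length : Int) = ((e - s.length : Nat) : Int) := by push_cast; omega
    have hslice : PySem.List.slice ds (some ((e:Int) - (s.length:Int)))
        (some ((e:Int) - (s.length:Int) + (s.length:Int)))
        = (ds.drop (e - s.length)).take s.length := by
      rw [hi']
      exact PySem.List.slice_natCast_add ds (e - s.length) s.length
    have hback : pvBack ds (c+1) (k + ((c+1:Nat):Int)) (e : Int)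
        = if (ds.drop (e - s.length)).take s.length = s
          then pvBack ds c (k + (c:Int)) ((e - s.length : Nat) : Int) else false := by
      have hj : k + ((c+1 : Nat) : Int) = (k + (c:Int)) + 1 := by push_cast; ring
      rw [hj]
      show (if PySem.List.slice ds (some ((e:Int) - ((PySem.Int.toChars (k + (c:Int) + 1)).length:Int)))
              (some ((e:Int) - ((PySem.Int.toChars (k + (c:Int) + 1)).length:Int) + ((PySem.Int.toChars (k + (c:Int) + 1)).length:Int))) = PySem.Int.toChars (k + (c:Int) + 1)
            then pvBack ds c (k + (c:Int) + 1 - 1) ((e:Int) - ((PySem.Int.toChars (k + (c:Int) + 1)).length:Int)) else false) = _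
      rw [← hs, hslice, hi']
      have : k + (c:Int) + 1 - 1 = k + (c:Int) := by ring
      rw [this]
    rw [hback]
    have hrec := ih k (e - s.length) (by omega) (by omega)
    have he3 : e - s.length - (pvCat k c).length = e - (pvCat k c).length - s.length := by omega
    rw [he3] at hrec
    have hR : ((ds.drop (e - (pvCat k (c+1)).length)).take (pvCat k (c+1)).length = pvCat k (c+1)) ↔
        ((ds.drop (e - (pvCat k c).length - s.length)).take (pvCat k c).length = pvCat k c ∧
         (ds.drop (e - s.length)).take s.length = s) := by
      have hv : pvCat k (c+1) = pvCat k c ++ s := by rw [pvCat_succ_right, hs]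
      rw [hv]
      simp only [List.length_append]
      rw [Nat.sub_add_eq]
      have hsplit := pv_seg_split ds (pvCat k c) s (e - (pvCat k c).length - s.length) (by omega)
      have he2 : e - (pvCat k c).length - s.length + (pvCat k c).length = e - s.length := by omega
      rw [he2] at hsplit
      exact hsplit
    constructor
    · intro h
      split_ifs at h with hchunk
      · exact hR.mpr ⟨hrec.mp h, hchunk⟩
    · intro h
      obtain ⟨h1, h2⟩ := hR.mp h
      rw [if_pos h2]
      exact hrec.mpr h1

-- the two outer loops agree candidate by candidate
theorem pv_outer (ds : List Char) : ∀ (lens : List Nat),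
    (∀ L ∈ lens, 1 ≤ L ∧ L ≤ ds.length ∧ (PySem.Int.ofChars? (ds.take L)).isSome = true) →
    pvTenta ds lens = pvBAlt ds lens := by
  intro lens
  induction lens with
  | nil => intro _; rfl
  | cons L rest ih =>
    intro h
    obtain ⟨h1, h2, h3⟩ := h L (List.mem_cons_self ..)
    obtain ⟨k, hk⟩ := Option.isSome_iff_exists.mp h3
    have hplen : (ds.take L).length = L := by simp; omega
    have hpref : (ds.take L) ≠ [] := by
      intro hnil; rw [hnil] at hplen; simp at hplen; omega
    -- the common characterisation: the rest of the string tiles as str(k+1) ++ … for some count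
    have hsplit : ds = ds.take L ++ ds.drop L := (List.take_append_drop L ds).symm
    -- A's verdict
    obtain ⟨b, hb, hiff⟩ := pv_Achar ds (ds.length + 2) 0 (ds.take L) none k
      (by omega) hpref (by omega) hk
    have hiffA : b = true ↔ ∃ c, ds.drop L = pvCat k c := by
      rw [hiff]
      constructor
      · rintro (hle | ⟨c, hc⟩)
        · omega
        · refine ⟨c, ?_⟩
          rw [List.drop_zero] at hc
          exact List.append_cancel_left (hsplit.symm.trans hc)
      · rintro ⟨c, hc⟩
        refine Or.inr ⟨c, ?_⟩
        rw [List.drop_zero]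
        conv_lhs => rw [hsplit]
        rw [hc]
    -- B's while loop
    obtain ⟨c0, -, heq, hge, hmin⟩ := pv_grow ds.length L k (ds.length + 1) 0
      (by simp [pvCat])
    have heq' : pvGrow ds.length (ds.length + 1) k L = some (k + (c0:Int), L + (pvCat k c0).length) := by
      simpa [pvCat] using heq
    have hcnt : ((k + (c0:Int)) - k).toNat = c0 := by omega
    have hdlen : (ds.drop L).length = ds.length - L := by simp
    by_cases hP : ∃ c, ds.drop L = pvCat k c
    · -- both accept
      obtain ⟨c, hc⟩ := hP
      have hclen : (pvCat k c).length = ds.length - L := by rw [← hc]; exact hdlen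
      have hc0c : c0 = c := by
        rcases lt_trichotomy c c0 with h' | h' | h'
        · have := hmin c (by omega) h'
          omega
        · exact h'.symm
        · have := pvCat_len_lt k c0 c h'
          omega
      subst hc0c
      have htot : L + (pvCat k c0).length = ds.length := by omega
      have hbackT : pvBack ds c0 (k + (c0:Int)) ((ds.length : Nat) : Int) = true := by
        rw [pv_back ds c0 k ds.length (by omega) (le_refl _)]
        have : ds.length - (pvCat k c0).length = L := by omega
        rw [this]
        rw [List.take_of_length_le (by omega), hc]
      have hbtrue : b = true := hiffA.mpr ⟨c0, hc⟩
      simp only [pvTenta, pvBAlt]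
      rw [hb, hbtrue, hk]
      dsimp only
      rw [heq']
      dsimp only
      rw [if_pos htot, hcnt, hbackT]
      simp
    · -- both reject this candidate and move on
      have hbfalse : b = false := by
        cases b with
        | true => exact absurd (hiffA.mp rfl) hP
        | false => rfl
      have hrest : pvTenta ds rest = pvBAlt ds rest :=
        ih (fun L' hL' => h L' (List.mem_cons_of_mem _ hL'))
      simp only [pvTenta, pvBAlt]
      rw [hb, hbfalse, hk]
      dsimp only
      rw [heq']
      dsimp only
      by_cases htot : L + (pvCat k c0).length = ds.length
      · rw [if_pos htot]
        have hbackF : pvBack ds c0 (k + (c0:Int)) ((ds.length : Nat) : Int) = false := by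
          cases hbv : pvBack ds c0 (k + (c0:Int)) ((ds.length : Nat) : Int) with
          | false => rfl
          | true =>
            exfalso
            apply hP
            refine ⟨c0, ?_⟩
            have := (pv_back ds c0 k ds.length (by omega) (le_refl _)).mp hbv
            have hL : ds.length - (pvCat k c0).length = L := by omega
            rw [hL, List.take_of_length_le (by omega)] at this
            exact this
        rw [hcnt, hbackF]
        exact hrest
      · rw [if_neg htot]
        exact hrest

-- ===== VERDICT (by name: the statement is the Claim_ definition above) =====
theorem encontrar_a_menor_A_spec : Claim_equal_encontrar_a_menor_A := by
  intro N digitos _ hpre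
  unfold Spec_encontrar_a_menor_A encontrar_a_menor_A encontrar_a_menor_A_alt
  apply pv_outer
  intro L hL
  have h := List.mem_range'_1.mp hL
  exact ⟨h.1, by omega, hpre L hL⟩
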